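-- pv_equiv track=rewrite | github.com/bonan-group/matchest | src/matchest/casteputils.py | count_scf_lines
-- ===== SOURCE A (Python) =====
-- def count_scf_lines(lines):
--     """
--     Extract the number of SCF cycles in the CASTEP files
--     """
--     counter = -1
--     lengths = []
--     for line in lines:
--         if "Initial" in line:
--             counter = 1
--             continue
--         if "----" in line and counter >= 1:
--             lengths.append(counter)
--             counter = -1
--             continue
--         # Counting the SCF lines
--         if counter >= 1:
--             counter += 1
--     return lengths
-- ===== SOURCE B (Python) =====
-- def count_scf_lines(lines):
--     """
--     Extract the number of SCF cycles in the CASTEP files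
--     """
--     # Pass 1: collect the indices of the interesting lines as events.
--     events = []
--     for i, line in enumerate(lines):
--         if "Initial" in line:
--             events.append((i, "initial"))
--         elif "----" in line:
--             events.append((i, "dash"))
--     # Pass 2: walk the events; a dash closes the most recent open "Initial".
--     lengths = []
--     pending = None
--     for idx, kind in events:
--         if kind == "initial":
--             pending = idx
--         elif pending is not None:
--             lengths.append(idx - pending)
--             pending = None
--     return lengths
-- ===== Notes on version B (the rewrite author's own statement) =====
-- stated objective: alternative
-- what changed: Replaces the running per-line counter by a two-pass event scheme: first collect (index, kind) events for 'Initial'/'----' lines, then walk the events with a pending start index and emit index differences instead of counting every intermediate line.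
import Mathlib
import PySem

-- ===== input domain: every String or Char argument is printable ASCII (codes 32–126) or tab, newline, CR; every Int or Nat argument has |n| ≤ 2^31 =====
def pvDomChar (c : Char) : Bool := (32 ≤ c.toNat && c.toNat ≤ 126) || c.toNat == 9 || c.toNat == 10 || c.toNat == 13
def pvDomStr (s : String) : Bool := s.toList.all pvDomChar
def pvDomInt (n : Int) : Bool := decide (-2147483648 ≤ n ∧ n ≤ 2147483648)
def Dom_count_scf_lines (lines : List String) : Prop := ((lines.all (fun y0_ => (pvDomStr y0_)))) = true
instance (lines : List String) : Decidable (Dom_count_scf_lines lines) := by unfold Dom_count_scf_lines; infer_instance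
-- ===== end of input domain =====

-- B collects (index, kind) events for 'Initial'/'----' lines in one pass, then walks the events with a pending
-- start index and emits index differences — an alternative decomposition of A's running per-line counter.


-- ===== PORT A =====
-- one Python loop iteration: state is (counter, lengths)
def aStep (st : Int × List Int) (line : String) : Int × List Int :=
  if PySem.Str.isIn "Initial" line then (1, st.2)
  else if PySem.Str.isIn "----" line ∧ 1 ≤ st.1 then (-1, st.2 ++ [st.1])
  else if 1 ≤ st.1 then (st.1 + 1, st.2)
  else st

def count_scf_lines (lines : List String) : List Int :=
  (lines.foldl aStep (-1, [])).2

-- ===== PORT B =====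
-- pass 1: events (index, kind)
def bEvStep (ev : List (Int × String)) (p : Int × String) : List (Int × String) :=
  if PySem.Str.isIn "Initial" p.2 then ev ++ [(p.1, "initial")]
  else if PySem.Str.isIn "----" p.2 then ev ++ [(p.1, "dash")]
  else ev

def bEvents (lines : List String) : List (Int × String) :=
  (PySem.List.enumerate lines).foldl bEvStep []

-- pass 2: walk the events; state is (pending, lengths)
def bWalk (st : Option Int × List Int) (e : Int × String) : Option Int × List Int :=
  if e.2 == "initial" then (some e.1, st.2)
  else
    match st.1 with
    | some s => (none, st.2 ++ [e.1 - s])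
    | none => st

def count_scf_lines_alt (lines : List String) : List Int :=
  ((bEvents lines).foldl bWalk (none, [])).2

-- ===== PRECONDITION & SPEC =====
def Spec_count_scf_lines (lines : List String) (out : List Int) : Prop := out = count_scf_lines_alt lines
instance (lines : List String) (out : List Int) : Decidable (Spec_count_scf_lines lines out) := by unfold Spec_count_scf_lines; infer_instance

-- ===== CLAIM (what is proved, stated in full; the proofs are below) =====
def Claim_equal_count_scf_lines : Prop := ∀ (lines : List String), Dom_count_scf_lines lines → Spec_count_scf_lines lines (count_scf_lines lines)

-- ===== LEMMAS AND PROOFS =====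

-- pass 1 accumulates by appending, so the accumulator splits off
theorem bEvStep_acc (xs : List (Int × String)) (acc : List (Int × String)) :
    xs.foldl bEvStep acc = acc ++ xs.foldl bEvStep [] := by
  induction xs generalizing acc with
  | nil => simp
  | cons x xs ih =>
    simp only [List.foldl_cons]
    rw [ih (bEvStep acc x), ih (bEvStep [] x)]
    simp [bEvStep]
    split_ifs <;> simp

-- the state correspondence: A's counter equals (current index − pending start), or both are inactive
theorem main_inv (lines : List String) :
    ∀ (s : Int) (counter : Int) (pending : Option Int) (lengths : List Int),
      (match pending with
       | none => counter < 1
       | some p => counter = s - p ∧ 1 ≤ counter) →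
      (lines.foldl aStep (counter, lengths)).2 =
        (((PySem.List.enumerate lines s).foldl bEvStep []).foldl bWalk (pending, lengths)).2 := by
  induction lines with
  | nil => intro s counter pending lengths _; simp [PySem.List.enumerate]
  | cons line rest ih =>
    intro s counter pending lengths hinv
    rw [PySem.List.enumerate_cons, List.foldl_cons, List.foldl_cons,
        bEvStep_acc _ (bEvStep [] (s, line)), List.foldl_append]
    by_cases hInit : PySem.Chars.isIn ['I','n','i','t','i','a','l'] line.toList = true
    · have hA : aStep (counter, lengths) line = (1, lengths) := by
        simp [aStep, hInit]
      have hB : (List.foldl bWalk (pending, lengths) (bEvStep [] (s, line))) = (some s, lengths) := by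
        simp [bEvStep, hInit, bWalk]
      rw [hA, hB]
      exact ih (s + 1) 1 (some s) lengths (by constructor <;> omega)
    · by_cases hDash : PySem.Chars.isIn ['-','-','-','-'] line.toList = true
      · have hE : bEvStep [] (s, line) = [(s, "dash")] := by simp [bEvStep, hInit, hDash]
        by_cases hc : 1 ≤ counter
        · obtain ⟨p, hp⟩ : ∃ p, pending = some p := by
            cases pending with
            | none => simp at hinv; omega
            | some p => exact ⟨p, rfl⟩
          subst hp
          simp only at hinv
          have hA : aStep (counter, lengths) line = (-1, lengths ++ [counter]) := by
            simp [aStep, hInit, hDash, hc]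
          have hB : (List.foldl bWalk ((some p : Option Int), lengths) [(s, "dash")]) =
              (none, lengths ++ [s - p]) := by
            simp [bWalk]
          rw [hA, hE, hB, hinv.1]
          exact ih (s + 1) (-1) none (lengths ++ [s - p]) (by omega)
        · have hpn : pending = none := by
            cases pending with
            | none => rfl
            | some p => simp only at hinv; omega
          subst hpn
          have hA : aStep (counter, lengths) line = (counter, lengths) := by
            simp [aStep, hInit, hDash, hc]
          have hB : (List.foldl bWalk ((none : Option Int), lengths) [(s, "dash")]) =
              (none, lengths) := by
            simp [bWalk]
          rw [hA, hE, hB]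
          exact ih (s + 1) counter none lengths (by simp at hinv ⊢; omega)
      · have hE : bEvStep [] (s, line) = [] := by simp [bEvStep, hInit, hDash]
        rw [hE, List.foldl_nil]
        by_cases hc : 1 ≤ counter
        · obtain ⟨p, hp⟩ : ∃ p, pending = some p := by
            cases pending with
            | none => simp at hinv; omega
            | some p => exact ⟨p, rfl⟩
          subst hp
          simp only at hinv
          have hA : aStep (counter, lengths) line = (counter + 1, lengths) := by
            simp [aStep, hInit, hDash, hc]
          rw [hA]
          exact ih (s + 1) (counter + 1) (some p) lengths (by constructor <;> omega)
        · have hpn : pending = none := by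
            cases pending with
            | none => rfl
            | some p => simp only at hinv; omega
          subst hpn
          have hA : aStep (counter, lengths) line = (counter, lengths) := by
            simp [aStep, hInit, hDash, hc]
          rw [hA]
          exact ih (s + 1) counter none lengths (by simp at hinv ⊢; omega)

-- ===== VERDICT (by name: the statement is the Claim_ definition above) =====
theorem count_scf_lines_spec : Claim_equal_count_scf_lines := by
  intro lines _
  unfold Spec_count_scf_lines count_scf_lines count_scf_lines_alt bEvents
  exact main_inv lines 0 (-1) none [] (by omega)
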